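-- pv_equiv track=rewrite | github.com/davidsousadev/web-cursos-exercicios | ifpi/pec/exercicios/semana-14/parte-2/117.py | calculaNegativosEPositivos
-- ===== SOURCE A (Python) =====
-- def calculaNegativosEPositivos(lista):
--     negativos = 0
--     soma = 0
--     for num in lista:
--         if num < 0:
--             negativos += 1
--         elif num > 0:
--             soma += num
--     return negativos, soma
-- ===== SOURCE B (Python) =====
-- def calculaNegativosEPositivos(lista):
--     # divide-and-conquer: split the list in half, solve each half, add the results
--     if not lista:
--         return 0, 0
--     if len(lista) == 1:
--         x = lista[0]
--         if x < 0:
--             return 1, 0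
--         elif x > 0:
--             return 0, x
--         else:
--             return 0, 0
--     mid = len(lista) // 2
--     n1, s1 = calculaNegativosEPositivos(lista[:mid])
--     n2, s2 = calculaNegativosEPositivos(lista[mid:])
--     return n1 + n2, s1 + s2
-- ===== Notes on version B (the rewrite author's own statement) =====
-- stated objective: alternative
-- what changed: Replaces the single left-to-right accumulating loop with a divide-and-conquer recursion that splits the list in half, solves each half independently, and adds the two (count, sum) pairs.
import Mathlib
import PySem

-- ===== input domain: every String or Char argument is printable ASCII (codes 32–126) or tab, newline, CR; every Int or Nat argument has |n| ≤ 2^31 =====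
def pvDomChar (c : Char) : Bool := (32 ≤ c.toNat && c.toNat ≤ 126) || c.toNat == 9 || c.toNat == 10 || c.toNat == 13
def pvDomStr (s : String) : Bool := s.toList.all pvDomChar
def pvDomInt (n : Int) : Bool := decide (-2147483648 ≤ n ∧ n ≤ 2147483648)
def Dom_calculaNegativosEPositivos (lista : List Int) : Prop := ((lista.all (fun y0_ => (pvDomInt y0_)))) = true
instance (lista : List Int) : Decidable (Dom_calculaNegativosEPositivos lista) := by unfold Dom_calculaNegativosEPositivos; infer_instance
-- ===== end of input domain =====

-- B replaces A's single accumulating loop by a divide-and-conquer recursion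
-- (split in half, solve each half, add the pairs): an alternative decomposition.

-- ===== PORT A =====
-- single fold over the pair state, branches in A's order
def calculaNegativosEPositivos (lista : List Int) : Int × Int :=
  lista.foldl
    (fun st num =>
      if num < 0 then (st.1 + 1, st.2)
      else if num > 0 then (st.1, st.2 + num)
      else st)
    (0, 0)

-- ===== PORT B =====
-- lista[:mid] / lista[mid:] with 0 ≤ mid ≤ len are List.take/List.drop exactly
def calculaNegativosEPositivos_alt (lista : List Int) : Int × Int :=
  match lista with
  | [] => (0, 0)
  | [x] => if x < 0 then (1, 0) else if x > 0 then (0, x) else (0, 0)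
  | x :: y :: rest =>
    let mid := (x :: y :: rest).length / 2
    let p1 := calculaNegativosEPositivos_alt ((x :: y :: rest).take mid)
    let p2 := calculaNegativosEPositivos_alt ((x :: y :: rest).drop mid)
    (p1.1 + p2.1, p1.2 + p2.2)
termination_by lista.length
decreasing_by
  · simp only [List.length_take, List.length_cons]
    omega
  · simp only [List.length_drop, List.length_cons]
    omega

-- ===== PRECONDITION & SPEC =====
def Spec_calculaNegativosEPositivos (lista : List Int) (out : Int × Int) : Prop := out = calculaNegativosEPositivos_alt lista
instance (lista : List Int) (out : Int × Int) : Decidable (Spec_calculaNegativosEPositivos lista out) := by unfold Spec_calculaNegativosEPositivos; infer_instance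

-- ===== CLAIM (what is proved, stated in full; the proofs are below) =====
def Claim_equal_calculaNegativosEPositivos : Prop := ∀ (lista : List Int), Dom_calculaNegativosEPositivos lista → Spec_calculaNegativosEPositivos lista (calculaNegativosEPositivos lista)

-- ===== LEMMAS AND PROOFS =====
-- the common characterisation: (number of negatives, sum of positives)
def calcNP_ref (l : List Int) : Int × Int :=
  ((l.countP (fun x => x < 0) : Int), (l.filter (fun x => x > 0)).sum)

lemma calcNP_ref_append (l₁ l₂ : List Int) :
    calcNP_ref (l₁ ++ l₂) =
      ((calcNP_ref l₁).1 + (calcNP_ref l₂).1, (calcNP_ref l₁).2 + (calcNP_ref l₂).2) := by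
  simp [calcNP_ref, List.countP_append, List.filter_append]

lemma calcNP_foldl_shift (lista : List Int) (a b : Int) :
    lista.foldl
      (fun st num =>
        if num < 0 then (st.1 + 1, st.2)
        else if num > 0 then (st.1, st.2 + num)
        else st)
      (a, b)
    = (a + (calcNP_ref lista).1, b + (calcNP_ref lista).2) := by
  induction lista generalizing a b with
  | nil => simp [calcNP_ref]
  | cons x xs ih =>
    simp only [List.foldl_cons, calcNP_ref, List.countP_cons, List.filter_cons]
    by_cases hx : x < 0
    · have hx' : ¬ x > 0 := by omega
      simp only [hx, hx', decide_true, decide_false, if_true, if_false, Bool.false_eq_true, ih,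
        calcNP_ref, Prod.mk.injEq]
      constructor <;> push_cast <;> ring
    · by_cases hp : x > 0
      · simp only [hx, hp, decide_true, decide_false, if_true, if_false, Bool.false_eq_true, ih,
          calcNP_ref, List.sum_cons, Prod.mk.injEq]
        constructor <;> push_cast <;> ring
      · simp only [hx, hp, decide_false, if_false, Bool.false_eq_true, ih, calcNP_ref, Prod.mk.injEq]
        constructor <;> push_cast <;> ring

lemma calcNP_A_eq_ref (lista : List Int) :
    calculaNegativosEPositivos lista = calcNP_ref lista := by
  unfold calculaNegativosEPositivos
  rw [calcNP_foldl_shift]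
  simp

lemma calcNP_alt_eq_ref (lista : List Int) :
    calculaNegativosEPositivos_alt lista = calcNP_ref lista := by
  induction hn : lista.length using Nat.strong_induction_on generalizing lista with
  | _ n ih =>
    match lista, hn with
    | [], _ => simp [calculaNegativosEPositivos_alt, calcNP_ref]
    | [x], _ =>
      simp only [calculaNegativosEPositivos_alt, calcNP_ref, List.countP_cons, List.countP_nil,
        List.filter_cons, List.filter_nil]
      by_cases hx : x < 0
      · have hx' : ¬ x > 0 := by omega
        simp [hx, hx']
      · by_cases hp : x > 0
        · simp [hx, hp]
        · simp [hx, hp]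
    | x :: y :: rest, hn =>
      rw [calculaNegativosEPositivos_alt]
      have hlen : (x :: y :: rest).length = n := hn
      have h1 : (List.take ((x :: y :: rest).length / 2) (x :: y :: rest)).length < n := by
        simp only [List.length_take]
        simp only [List.length_cons] at hlen ⊢
        omega
      have h2 : (List.drop ((x :: y :: rest).length / 2) (x :: y :: rest)).length < n := by
        simp only [List.length_drop]
        simp only [List.length_cons] at hlen ⊢
        omega
      rw [ih _ h1 _ rfl, ih _ h2 _ rfl]
      have := calcNP_ref_append (List.take ((x :: y :: rest).length / 2) (x :: y :: rest))
        (List.drop ((x :: y :: rest).length / 2) (x :: y :: rest))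
      rw [List.take_append_drop] at this
      rw [this]

-- ===== VERDICT (by name: the statement is the Claim_ definition above) =====
theorem calculaNegativosEPositivos_spec : Claim_equal_calculaNegativosEPositivos := by
  intro lista _
  unfold Spec_calculaNegativosEPositivos
  rw [calcNP_A_eq_ref, calcNP_alt_eq_ref]
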